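-- pv_equiv track=rewrite | github.com/DM-09/BaekjoonCode | 전체 문제/Sliver I/1747.py | SOE
-- ===== SOURCE A (Python) =====
-- def SOE(MAX, MIN=1):
--     box, l = [], [i + 1 for i in range(MAX)]
--
--     for i in range(MAX):
--         c = l[i]
--         if c != 1 and c != 0:
--             for j in range(2, MAX // c + 1):
--                 l[c * j - 1] = 0
--             if c >= MIN:
--                 c = str(c)
--                 if c == c[::-1]:
--                     return c
-- ===== SOURCE B (Python) =====
-- def _is_prime(n):
--     d = 2
--     while d * d <= n:
--         if n % d == 0:
--             return False
--         d += 1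
--     return True
--
--
-- def SOE(MAX, MIN=1):
--     for n in range(2, MAX + 1):
--         if n >= MIN and _is_prime(n):
--             s = str(n)
--             if s == s[::-1]:
--                 return s
--     return None
-- ===== Notes on version B (the rewrite author's own statement) =====
-- stated objective: simpler
-- what changed: Replaces the mutable sieve-of-Eratosthenes list with a direct scan of candidates 2..MAX using trial-division primality, returning the first palindromic prime >= MIN.
import Mathlib
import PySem

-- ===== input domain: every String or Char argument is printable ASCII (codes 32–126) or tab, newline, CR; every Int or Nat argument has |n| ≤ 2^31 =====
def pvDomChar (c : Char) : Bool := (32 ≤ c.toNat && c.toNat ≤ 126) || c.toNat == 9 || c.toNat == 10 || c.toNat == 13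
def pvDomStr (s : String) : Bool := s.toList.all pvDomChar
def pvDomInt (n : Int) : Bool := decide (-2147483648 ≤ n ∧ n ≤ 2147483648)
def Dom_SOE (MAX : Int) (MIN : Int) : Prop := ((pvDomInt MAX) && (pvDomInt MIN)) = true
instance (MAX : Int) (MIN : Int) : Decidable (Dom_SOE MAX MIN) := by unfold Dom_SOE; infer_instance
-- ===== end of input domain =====

-- B replaces A's mutated sieve list with a direct scan of 2..MAX using trial-division
-- primality (simpler, O(1) extra space); A mutates its local list only, so no caller-visible
-- side effect differs.

-- ===== PORT A =====
-- A's 'for i in range(MAX)' loop with early return; the Python list l is mutated in place,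
-- threaded explicitly here as an Array (so each 'l[c*j-1] = 0' is O(1), like Python's).
-- Every index used (i from range(MAX), and c*j-1 ≥ 3) is nonnegative and within range in
-- every reachable state, so '.toNat' plus the total getD/setIfInBounds are exact here.
def SOE_go (MAX : Int) (MIN : Int) (l : Array Int) : List Int → Option String
  | [] => none
  | i :: rest =>
    let c := l.getD i.toNat 0
    if c ≠ 1 ∧ c ≠ 0 then
      let l' := (PySem.List.pyRange 2 (PySem.Int.floordiv MAX c + 1) 1).foldl
        (fun acc j => acc.setIfInBounds (c * j - 1).toNat 0) l
      if MIN ≤ c then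
        let s := PySem.Int.toStr c
        -- s == s[::-1]; a step of -1 never raises, so comparing with 'some s' is exact
        if PySem.Str.slice? s none none (-1) = some s then some s
        else SOE_go MAX MIN l' rest
      else SOE_go MAX MIN l' rest
    else SOE_go MAX MIN l rest

def SOE (MAX : Int) (MIN : Int) : Option String :=
  SOE_go MAX MIN (((PySem.List.pyRange 0 MAX 1).map (fun i => i + 1)).toArray)
    (PySem.List.pyRange 0 MAX 1)

-- ===== PORT B =====
-- Source B's helper _is_prime: 'd = 2; while d*d <= n: …'; the while loop is this recursion on d
def isPrimeGo (n : Int) (d : Int) : Bool :=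
  if d * d ≤ n then
    if PySem.Int.mod n d = 0 then false else isPrimeGo n (d + 1)
  else true
termination_by (n + 1 - d).toNat
decreasing_by
  have hdn : d ≤ n := by
    by_cases h0 : d ≤ 0
    · nlinarith [mul_self_nonneg d]
    · nlinarith
  omega

def isPrimeB (n : Int) : Bool := isPrimeGo n 2

def SOE_alt_go (MIN : Int) : List Int → Option String
  | [] => none
  | n :: rest =>
    if MIN ≤ n ∧ isPrimeB n = true then
      let s := PySem.Int.toStr n
      if PySem.Str.slice? s none none (-1) = some s then some s
      else SOE_alt_go MIN rest
    else SOE_alt_go MIN rest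

def SOE_alt (MAX : Int) (MIN : Int) : Option String :=
  SOE_alt_go MIN (PySem.List.pyRange 2 (MAX + 1) 1)

-- ===== PRECONDITION & SPEC =====
def Spec_SOE (MAX : Int) (MIN : Int) (out : Option String) : Prop := out = SOE_alt MAX MIN
instance (MAX : Int) (MIN : Int) (out : Option String) : Decidable (Spec_SOE MAX MIN out) := by unfold Spec_SOE; infer_instance

-- ===== CLAIM (what is proved, stated in full; the proofs are below) =====
def Claim_equal_SOE : Prop := ∀ (MAX : Int) (MIN : Int), Dom_SOE MAX MIN → Spec_SOE MAX MIN (SOE MAX MIN)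

-- ===== LEMMAS AND PROOFS =====

-- After A's loop has processed indices 0..i-1, cell k of l is 0 exactly when k+1 has a
-- nontrivial divisor ≤ i (computable form of the sieve invariant).
def zeroedB (i m : Nat) : Bool :=
  (List.range (i + 1)).any (fun d => decide (2 ≤ d) && decide (d < m) && decide (d ∣ m))

lemma zeroedB_iff (i m : Nat) :
    zeroedB i m = true ↔ ∃ d, 2 ≤ d ∧ d ≤ i ∧ d < m ∧ d ∣ m := by
  simp only [zeroedB, List.any_eq_true, List.mem_range, Bool.and_eq_true, decide_eq_true_eq]
  constructor
  · rintro ⟨d, hd, ⟨h2, hlt⟩, hdvd⟩; exact ⟨d, h2, by omega, hlt, hdvd⟩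
  · rintro ⟨d, h2, hle, hlt, hdvd⟩; exact ⟨d, by omega, ⟨h2, hlt⟩, hdvd⟩

lemma zeroedB_self_iff (i : Nat) (h1 : 1 ≤ i) :
    zeroedB i (i + 1) = false ↔ (i + 1).Prime := by
  constructor
  · intro h
    rw [Nat.prime_def_lt]
    refine ⟨by omega, fun m hm hdvd => ?_⟩
    by_contra hne
    have hm0 : m ≠ 0 := by
      rintro rfl
      exact absurd (Nat.eq_zero_of_zero_dvd hdvd) (by omega)
    have ht : zeroedB i (i + 1) = true :=
      (zeroedB_iff _ _).2 ⟨m, by omega, by omega, hm, hdvd⟩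
    rw [h] at ht; exact Bool.false_ne_true ht
  · intro hp
    by_contra h
    have ht := (zeroedB_iff i (i + 1)).1 (by simpa using h)
    obtain ⟨d, h2, hle, hlt, hdvd⟩ := ht
    have := (Nat.prime_def_lt.1 hp).2 d hlt hdvd
    omega

lemma zeroedB_step_not_prime (i m : Nat) (hp : ¬ (i + 1).Prime) :
    zeroedB (i + 1) m = zeroedB i m := by
  rw [Bool.eq_iff_iff, zeroedB_iff, zeroedB_iff]
  constructor
  · rintro ⟨d, h2, hle, hlt, hdvd⟩
    rcases Nat.lt_or_ge d (i + 1) with hd | hd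
    · exact ⟨d, h2, by omega, hlt, hdvd⟩
    · -- d = i + 1, composite since ¬(i+1).Prime and 2 ≤ d
      have hdi : d = i + 1 := by omega
      obtain ⟨p, hpp, hpd⟩ := Nat.exists_prime_and_dvd (show i + 1 ≠ 1 by omega)
      have hple : p ≤ i + 1 := Nat.le_of_dvd (by omega) hpd
      have hpne : p ≠ i + 1 := by rintro rfl; exact hp hpp
      exact ⟨p, hpp.two_le, by omega, by omega, hpd.trans (hdi ▸ hdvd)⟩
  · rintro ⟨d, h2, hle, hlt, hdvd⟩
    exact ⟨d, h2, by omega, hlt, hdvd⟩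

lemma zeroedB_step_prime (i m : Nat) (h1 : 1 ≤ i) :
    zeroedB (i + 1) m = (zeroedB i m || (decide ((i + 1) ∣ m) && decide (i + 1 < m))) := by
  rw [Bool.eq_iff_iff]
  simp only [Bool.or_eq_true, Bool.and_eq_true, decide_eq_true_eq, zeroedB_iff]
  constructor
  · rintro ⟨d, h2, hle, hlt, hdvd⟩
    rcases Nat.lt_or_ge d (i + 1) with hd | hd
    · exact Or.inl ⟨d, h2, by omega, hlt, hdvd⟩
    · have : d = i + 1 := by omega
      subst this; exact Or.inr ⟨hdvd, hlt⟩
  · rintro (⟨d, h2, hle, hlt, hdvd⟩ | ⟨hdvd, hlt⟩)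
    · exact ⟨d, h2, by omega, hlt, hdvd⟩
    · exact ⟨i + 1, by omega, le_refl _, hlt, hdvd⟩

lemma isPrimeGo_fuel (fuel : Nat) : ∀ (m d : Nat), 2 ≤ d → m + 1 - d ≤ fuel →
    (isPrimeGo (m : Int) (d : Int) = true ↔ ∀ e : Nat, d ≤ e → e * e ≤ m → ¬ e ∣ m) := by
  induction fuel with
  | zero =>
    intro m d hd hf
    have hmd : m < d := by omega
    rw [isPrimeGo, if_neg (by nlinarith)]
    simp only [true_iff]
    intro e he hee hdvd
    nlinarith
  | succ fuel ih =>
    intro m d hd hf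
    rw [isPrimeGo]
    by_cases hdd : d * d ≤ m
    · rw [if_pos (by exact_mod_cast hdd)]
      rw [PySem.Int.mod_natCast]
      by_cases hdvd : d ∣ m
      · have hm0 : m % d = 0 := Nat.dvd_iff_mod_eq_zero.mp hdvd
        rw [hm0, if_pos (by norm_num)]
        simp only [Bool.false_eq_true, false_iff]
        push Not
        exact ⟨d, le_refl _, hdd, hdvd⟩
      · have hm0 : m % d ≠ 0 := fun h => hdvd (Nat.dvd_iff_mod_eq_zero.mpr h)
        rw [if_neg (by exact_mod_cast hm0)]
        have hcast : ((d : Int) + 1) = ((d + 1 : Nat) : Int) := by push_cast; ring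
        rw [hcast, ih m (d + 1) (by omega) (by omega)]
        constructor
        · intro h e he hee hdvd'
          rcases Nat.eq_or_lt_of_le he with rfl | hlt
          · exact hdvd hdvd'
          · exact h e (by omega) hee hdvd'
        · intro h e he hee hdvd'
          exact h e (by omega) hee hdvd'
    · rw [if_neg (by exact_mod_cast hdd)]
      simp only [true_iff]
      intro e he hee hdvd
      exact hdd (le_trans (Nat.mul_le_mul he he) hee)

lemma isPrimeGo_iff (m d : Nat) (hd : 2 ≤ d) :
    isPrimeGo (m : Int) (d : Int) = true ↔ ∀ e : Nat, d ≤ e → e * e ≤ m → ¬ e ∣ m :=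
  isPrimeGo_fuel (m + 1 - d) m d hd (le_refl _)

lemma isPrimeB_iff (m : Nat) (h2 : 2 ≤ m) : isPrimeB (m : Int) = true ↔ m.Prime := by
  unfold isPrimeB
  have h2' : (2 : Int) = ((2 : Nat) : Int) := by norm_cast
  rw [h2', isPrimeGo_iff m 2 (le_refl _)]
  constructor
  · intro h
    by_contra hnp
    have hp := Nat.minFac_prime (show m ≠ 1 by omega)
    have hsq : m.minFac * m.minFac ≤ m := by
      rw [← pow_two]; exact Nat.minFac_sq_le_self (by omega) hnp
    exact h m.minFac hp.two_le hsq (Nat.minFac_dvd m)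
  · intro hp e he hee hdvd
    rcases Nat.Prime.eq_one_or_self_of_dvd hp e hdvd with h1 | h1
    · omega
    · subst h1; nlinarith

-- getD-characterisation of the inner sieve loop (indices are set to the default 0, so no
-- range side conditions are needed)
lemma arr_getD_setIfInBounds (a : Array Int) (m k : Nat) :
    ((a.setIfInBounds m 0).getD k 0) = if k = m then 0 else a.getD k 0 := by
  rw [Array.getD_eq_getD_getElem?, Array.getD_eq_getD_getElem?, Array.getElem?_setIfInBounds]
  by_cases h : m = k
  · subst h; cases hh : a[m]? <;> simp <;> split <;> simp_all
  · simp [h, Ne.symm h]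

lemma foldl_set_getD (c : Int) (hc : 2 ≤ c) (js : List Int) (hjs : ∀ j ∈ js, 2 ≤ j)
    (a : Array Int) (k : Nat) :
    ((js.foldl (fun acc j => acc.setIfInBounds (c * j - 1).toNat 0) a).getD k 0) =
      if ∃ j ∈ js, c * j - 1 = (k : Int) then 0 else a.getD k 0 := by
  induction js generalizing a with
  | nil => simp
  | cons j js ih =>
    have hj : 2 ≤ j := hjs j List.mem_cons_self
    have h0 : (0:Int) ≤ c * j - 1 := by nlinarith
    rw [List.foldl_cons, ih (fun j' hj' => hjs j' (List.mem_cons_of_mem _ hj')),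
        arr_getD_setIfInBounds]
    by_cases hin : ∃ j' ∈ js, c * j' - 1 = (k : Int)
    · rw [if_pos hin,
         if_pos ⟨hin.choose, List.mem_cons_of_mem _ hin.choose_spec.1, hin.choose_spec.2⟩]
    · rw [if_neg hin]
      by_cases hk : c * j - 1 = (k : Int)
      · rw [if_pos (show k = (c * j - 1).toNat by omega), if_pos ⟨j, List.mem_cons_self, hk⟩]
      · rw [if_neg (show ¬ k = (c * j - 1).toNat by omega), if_neg ?hne]
        case hne =>
          rintro ⟨j', hj', hkj⟩
          rcases List.mem_cons.1 hj' with rfl | hmem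
          · exact hk hkj
          · exact hin ⟨j', hmem, hkj⟩

lemma sieve_mem (N i k : Nat) (hk : k < N) (h1 : 1 ≤ i) :
    (∃ j ∈ PySem.List.pyRange 2 (((N / (i + 1) : Nat) : Int) + 1) 1,
        ((i + 1 : Nat) : Int) * j - 1 = (k : Int)) ↔ ((i + 1) ∣ (k + 1) ∧ i + 1 < k + 1) := by
  constructor
  · rintro ⟨j, hj, hjk⟩
    rw [PySem.List.mem_pyRange_one] at hj
    have hck : ((i + 1 : Nat) : Int) * (j.toNat : Int) = ((k + 1 : Nat) : Int) := by
      rw [Int.toNat_of_nonneg (by omega)]; push_cast at hjk ⊢; linarith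
    have hck' : (i + 1) * j.toNat = k + 1 := by exact_mod_cast hck
    have hj2 : 2 ≤ j.toNat := by omega
    refine ⟨⟨j.toNat, hck'.symm⟩, ?_⟩
    nlinarith
  · rintro ⟨⟨t, ht⟩, hlt⟩
    have ht2 : 2 ≤ t := by nlinarith
    refine ⟨(t : Int), ?_, ?_⟩
    · rw [PySem.List.mem_pyRange_one]
      have htd : t ≤ N / (i + 1) := Nat.le_div_iff_mul_le (by omega) |>.2 (by nlinarith)
      constructor
      · exact_mod_cast ht2
      · have h' : (t : Int) ≤ ((N / (i + 1) : Nat) : Int) := by exact_mod_cast htd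
        omega
    · have hI : ((k + 1 : Nat) : Int) = (((i + 1) * t : Nat) : Int) := by exact_mod_cast congrArg (fun z : Nat => (z : Int)) ht
      push_cast at hI ⊢
      linarith

lemma main_fuel (N : Nat) (MIN : Int) (fuel : Nat) : ∀ (i : Nat), 1 ≤ i → N - i ≤ fuel →
    ∀ l : Array Int,
    (∀ k, k < N → l.getD k 0 = if zeroedB i (k + 1) then 0 else ((k : Int) + 1)) →
    SOE_go (N : Int) MIN l (PySem.List.pyRange (i : Int) (N : Int) 1) =
      SOE_alt_go MIN (PySem.List.pyRange ((i : Int) + 1) ((N : Int) + 1) 1) := by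
  induction fuel with
  | zero =>
    intro i h1 hf l H
    rw [PySem.List.pyRange_one_eq_nil (show (N:Int) ≤ (i:Int) by exact_mod_cast (by omega : N ≤ i)),
        PySem.List.pyRange_one_eq_nil (show (N:Int) + 1 ≤ (i:Int) + 1 by
          have : (N:Int) ≤ (i:Int) := by exact_mod_cast (by omega : N ≤ i)
          omega)]
    rfl
  | succ fuel ih =>
    intro i h1 hf l H
    by_cases hiN : i < N
    case neg =>
      rw [PySem.List.pyRange_one_eq_nil (show (N:Int) ≤ (i:Int) by exact_mod_cast (by omega : N ≤ i)),
          PySem.List.pyRange_one_eq_nil (show (N:Int) + 1 ≤ (i:Int) + 1 by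
            have : (N:Int) ≤ (i:Int) := by exact_mod_cast (by omega : N ≤ i)
            omega)]
      rfl
    case pos =>
    rw [PySem.List.pyRange_one_cons (show (i:Int) < (N:Int) by exact_mod_cast hiN),
        PySem.List.pyRange_one_cons (show (i:Int) + 1 < (N:Int) + 1 by
          have : (i:Int) < (N:Int) := by exact_mod_cast hiN
          omega)]
    simp only [SOE_go, SOE_alt_go]
    rw [show ((i : Int)).toNat = i from Int.toNat_natCast i, H i hiN]
    by_cases hp : (i + 1).Prime
    · have hz : zeroedB i (i + 1) = false := (zeroedB_self_iff i h1).2 hp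
      rw [hz]
      simp only [Bool.false_eq_true, if_false]
      have hi1 : (1 : Int) ≤ (i : Int) := by exact_mod_cast h1
      rw [if_pos (show ((i:Int) + 1 ≠ 1 ∧ (i:Int) + 1 ≠ 0) from ⟨by omega, by omega⟩)]
      rw [show ((i:Int) + 1) = ((i + 1 : Nat) : Int) by push_cast; ring]
      rw [PySem.Int.floordiv_natCast]
      have hpB : isPrimeB ((i + 1 : Nat) : Int) = true := (isPrimeB_iff (i + 1) (by omega)).2 hp
      have H' : ∀ k, k < N →
          ((PySem.List.pyRange 2 (((N / (i + 1) : Nat) : Int) + 1) 1).foldl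
              (fun acc j => acc.setIfInBounds ((((i + 1 : Nat) : Int)) * j - 1).toNat 0) l).getD k 0 =
            if zeroedB (i + 1) (k + 1) then 0 else ((k : Int) + 1) := by
        intro k hk
        rw [foldl_set_getD ((i + 1 : Nat) : Int) (by exact_mod_cast (by omega : 2 ≤ i + 1)) _
              (fun j hj => (PySem.List.mem_pyRange_one.1 hj).1) l k]
        rw [zeroedB_step_prime i (k + 1) h1]
        by_cases hd : ((i + 1) ∣ (k + 1) ∧ i + 1 < k + 1)
        · rw [if_pos ((sieve_mem N i k hk h1).2 hd)]
          have ht : (zeroedB i (k + 1) || (decide ((i + 1) ∣ (k + 1)) && decide (i + 1 < k + 1))) = true := by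
            simp [hd.1, hd.2]
          rw [ht, if_pos rfl]
        · rw [if_neg (fun hmem => hd ((sieve_mem N i k hk h1).1 hmem)), H k hk]
          have hX : (decide ((i + 1) ∣ (k + 1)) && decide (i + 1 < k + 1)) = false := by
            by_cases hA : (i + 1) ∣ (k + 1)
            · have hB : ¬ (i + 1 < k + 1) := fun hB => hd ⟨hA, hB⟩
              simp [hA, hB]
            · simp [hA]
          rw [hX, Bool.or_false]
      by_cases hmin : MIN ≤ ((i + 1 : Nat) : Int)
      · rw [if_pos hmin,
            if_pos (show MIN ≤ ((i + 1 : Nat) : Int) ∧ isPrimeB ((i + 1 : Nat) : Int) = true from ⟨hmin, hpB⟩)]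
        by_cases hpal : PySem.Str.slice? (PySem.Int.toStr ((i + 1 : Nat) : Int)) none none (-1) =
            some (PySem.Int.toStr ((i + 1 : Nat) : Int))
        · rw [if_pos hpal, if_pos hpal]
        · rw [if_neg hpal, if_neg hpal]
          have h2 := ih (i + 1) (by omega) (by omega) _ H'
          push_cast at h2 ⊢
          exact h2
      · rw [if_neg hmin, if_neg (fun hco => hmin hco.1)]
        have h2 := ih (i + 1) (by omega) (by omega) _ H'
        push_cast at h2 ⊢
        exact h2
    · have hz : zeroedB i (i + 1) = true := by
        by_contra h
        exact hp ((zeroedB_self_iff i h1).1 (by simpa using h))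
      rw [hz]
      have hpB : isPrimeB ((i:Int) + 1) ≠ true := by
        rw [show ((i:Int) + 1) = ((i + 1 : Nat) : Int) by push_cast; ring]
        intro h
        exact hp ((isPrimeB_iff (i + 1) (by omega)).1 h)
      rw [if_neg (by simp), if_neg (fun hco => hpB hco.2)]
      have H' : ∀ k, k < N → l.getD k 0 = if zeroedB (i + 1) (k + 1) then 0 else ((k : Int) + 1) := by
        intro k hk
        rw [zeroedB_step_not_prime i (k + 1) hp]
        exact H k hk
      have := ih (i + 1) (by omega) (by omega) l H'
      push_cast at this
      exact this

-- ===== VERDICT (by name: the statement is the Claim_ definition above) =====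
theorem SOE_spec : Claim_equal_SOE := by
  intro MAX MIN _
  unfold Spec_SOE SOE SOE_alt
  by_cases hM : MAX ≤ 0
  · rw [PySem.List.pyRange_one_eq_nil hM, PySem.List.pyRange_one_eq_nil (by omega : MAX + 1 ≤ 2)]
    rfl
  · obtain ⟨N, rfl⟩ : ∃ N : Nat, MAX = (N : Int) :=
      ⟨MAX.toNat, (Int.toNat_of_nonneg (by omega)).symm⟩
    have hN : 1 ≤ N := by exact_mod_cast (by omega : (1:Int) ≤ (N:Int))
    have h0N : (0:Int) < (N:Int) := by exact_mod_cast hN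
    have H : ∀ k, k < N →
        (((PySem.List.pyRange 0 (N:Int) 1).map (fun i => i + 1)).toArray).getD k 0 =
          if zeroedB 1 (k + 1) then 0 else ((k : Int) + 1) := by
      intro k hk
      have hz : zeroedB 1 (k + 1) = false := by
        by_contra h
        obtain ⟨d, h2, hle, hlt, hdvd⟩ := (zeroedB_iff _ _).1 (by simpa using h)
        omega
      rw [hz]
      simp only [Bool.false_eq_true, if_false]
      rw [Array.getD_eq_getD_getElem?, List.getElem?_toArray, ← List.getD_eq_getElem?_getD,
          PySem.List.pyRange_zero_nat, List.map_map, PySem.List.getD_map_range _ _ _ _ hk]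
      simp
    set l0 := ((PySem.List.pyRange 0 (N:Int) 1).map (fun i => i + 1)).toArray with hl0
    rw [PySem.List.pyRange_one_cons h0N]
    simp only [SOE_go]
    have hc : l0.getD ((0:Int)).toNat 0 = 1 := by
      rw [hl0, PySem.List.pyRange_one_cons h0N]
      simp
    rw [hc, if_neg (by norm_num : ¬((1:Int) ≠ 1 ∧ (1:Int) ≠ 0))]
    have hmain := main_fuel N MIN N 1 (le_refl 1) (by omega) l0 H
    push_cast at hmain ⊢
    exact hmain
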